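-- pv_equiv track=rewrite | github.com/jano31415/codejam | codeforces/740_round_div2/probc.py | solve
-- ===== SOURCE A (Python) =====
-- def solve(caves):
--     for j,cave in enumerate(caves):
--         caves[j] = [cave[i]-i for i in range(len(cave))]
--
--     difficulty = [(max(a), len(a)) for a in caves]
--     min_level = 0
--     difficulty.sort(key=lambda x: x[0])
--     cur = min_level
--     for diff, size in difficulty:
--         if diff >= cur:
--             skill_needed = (diff-cur)+1
--             cur += skill_needed
--             min_level += skill_needed
--         cur += size
--     return min_level
-- ===== SOURCE B (Python) =====
-- def solve(caves):
--     for j, cave in enumerate(caves):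
--         caves[j] = [v - i for i, v in enumerate(cave)]
--     stats = [(max(a), len(a)) for a in caves]
--     best = 0
--     for diff, _size in stats:
--         below = sum(size for d, size in stats if d < diff)
--         best = max(best, diff - below + 1)
--     return best
-- ===== Notes on version B (the rewrite author's own statement) =====
-- stated objective: alternative
-- what changed: Eliminates the sort and the threaded (cur, min_level) state entirely: B computes, for each cave independently, its difficulty minus the total size of all strictly easier caves plus one, and returns the max of those values and 0; Pre_ excludes inputs where some cave has no monsters, on which the max of a zero-length sequence raises ValueError in both A and B.
-- outside the precondition, e.g. on solve([[1, 2], []]): A raises ValueError, B raises ValueError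
import Mathlib
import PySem

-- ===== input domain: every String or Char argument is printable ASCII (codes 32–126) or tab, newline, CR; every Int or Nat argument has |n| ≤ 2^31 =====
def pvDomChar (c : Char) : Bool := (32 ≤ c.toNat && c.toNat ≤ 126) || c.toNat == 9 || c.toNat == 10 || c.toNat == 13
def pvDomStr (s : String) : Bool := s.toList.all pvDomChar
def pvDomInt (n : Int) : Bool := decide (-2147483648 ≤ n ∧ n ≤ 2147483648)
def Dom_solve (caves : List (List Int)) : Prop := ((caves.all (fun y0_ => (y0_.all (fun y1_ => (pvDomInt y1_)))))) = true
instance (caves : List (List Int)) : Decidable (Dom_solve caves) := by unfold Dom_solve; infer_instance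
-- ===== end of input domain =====

-- B drops the sort entirely: for each cave it sums the sizes of all strictly easier caves
-- and takes the max of diff - below + 1 (alternative decomposition; O(n^2) scan instead of
-- sort + threaded state). Equivalence is about the return value (both Pythons mutate `caves`
-- identically in place).

-- ===== PORT A =====
def solve (caves : List (List Int)) : Int :=
  let caves := caves.map (fun cave =>
    (PySem.List.pyRange 0 cave.length 1).map (fun i => PySem.List.pyGetD cave i 0 - i))
  let difficulty := caves.map (fun a => ((PySem.List.max? a (fun x => x)).getD 0, (a.length : Int)))
  let difficulty := PySem.List.sorted difficulty (fun x => x.1) false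
  let s := difficulty.foldl (fun (st : Int × Int) p =>
      if p.1 ≥ st.2 then (st.1 + ((p.1 - st.2) + 1), (st.2 + ((p.1 - st.2) + 1)) + p.2)
      else (st.1, st.2 + p.2)) (0, 0)
  s.1

-- ===== PORT B =====
def solve_alt (caves : List (List Int)) : Int :=
  let caves := caves.map (fun cave =>
    (PySem.List.enumerate cave 0).map (fun p => p.2 - p.1))
  let stats := caves.map (fun a => ((PySem.List.max? a (fun x => x)).getD 0, (a.length : Int)))
  stats.foldl (fun best p =>
    max best (p.1 - ((stats.filter (fun q => decide (q.1 < p.1))).foldl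
        (fun s q => s + q.2) 0) + 1)) 0

-- ===== PRECONDITION & SPEC =====
-- Pre_ excludes inputs in which some cave has no monsters, since taking the max of a zero-length sequence raises ValueError in both A and B.
def Pre_solve (caves : List (List Int)) : Prop := ∀ a ∈ caves, a ≠ []
instance (caves : List (List Int)) : Decidable (Pre_solve caves) := by unfold Pre_solve; infer_instance
def pvWitness_solve : List (List Int) := [[3, 1], [2]]
def Spec_solve (caves : List (List Int)) (out : Int) : Prop := out = solve_alt caves
instance (caves : List (List Int)) (out : Int) : Decidable (Spec_solve caves out) := by unfold Spec_solve; infer_instance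

-- ===== CLAIM (what is proved, stated in full; the proofs are below) =====
def Claim_equal_solve : Prop := ∀ (caves : List (List Int)), Dom_solve caves → Pre_solve caves → Spec_solve caves (solve caves)

-- ===== LEMMAS AND PROOFS =====

-- total size of the strictly easier caves
def SB (l : List (Int × Int)) (x : Int) : Int :=
  (l.filter (fun q => decide (q.1 < x))).foldl (fun s q => s + q.2) 0

lemma foldl_add_start (m : List (Int × Int)) :
    ∀ s : Int, m.foldl (fun s q => s + q.2) s = s + (m.map Prod.snd).sum := by
  induction m with
  | nil => intro s; simp
  | cons p t ih =>
    intro s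
    simp only [List.foldl_cons, List.map_cons, List.sum_cons, ih]
    omega

lemma SB_eq_sum (l : List (Int × Int)) (x : Int) :
    SB l x = ((l.filter (fun q => decide (q.1 < x))).map Prod.snd).sum := by
  unfold SB
  rw [foldl_add_start]
  omega

lemma SB_nonneg (l : List (Int × Int)) (x : Int) (h : ∀ q ∈ l, 0 ≤ q.2) : 0 ≤ SB l x := by
  rw [SB_eq_sum]
  apply List.sum_nonneg
  intro a ha
  obtain ⟨q, hq, rfl⟩ := List.mem_map.1 ha
  exact h q (List.mem_filter.1 hq).1

lemma SB_cons (p : Int × Int) (t : List (Int × Int)) (x : Int) :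
    SB (p :: t) x = (if p.1 < x then p.2 else 0) + SB t x := by
  rw [SB_eq_sum, SB_eq_sum, List.filter_cons]
  by_cases h : p.1 < x
  · simp [h]
  · simp [h]

lemma SB_perm {l l' : List (Int × Int)} (h : l.Perm l') (x : Int) : SB l x = SB l' x := by
  rw [SB_eq_sum, SB_eq_sum]
  exact ((h.filter _).map _).sum_eq

-- a fold of max over a value function is permutation-invariant
lemma foldl_max_perm {l l' : List (Int × Int)} (h : l.Perm l') (w : Int × Int → Int) :
    ∀ b : Int, l.foldl (fun acc q => max acc (w q)) b = l'.foldl (fun acc q => max acc (w q)) b := by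
  induction h with
  | nil => intro b; rfl
  | cons x _ ih => intro b; simp only [List.foldl_cons, ih]
  | swap x y l => intro b; simp only [List.foldl_cons, max_right_comm]
  | trans _ _ ih1 ih2 => intro b; rw [ih1, ih2]

-- fold of max with two value functions agreeing except where both are dominated by the start
lemma maxfold_congr (t : List (Int × Int)) (w w' : Int × Int → Int) :
    ∀ a : Int, (∀ q ∈ t, w q = w' q ∨ (w q ≤ a ∧ w' q ≤ a)) →
    t.foldl (fun acc q => max acc (w q)) a = t.foldl (fun acc q => max acc (w' q)) a := by
  induction t with
  | nil => intro a _; rfl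
  | cons q t ih =>
    intro a h
    simp only [List.foldl_cons]
    rcases h q (by simp) with heq | ⟨h1, h2⟩
    · rw [heq]
      apply ih
      intro r hr
      rcases h r (by simp [hr]) with h' | ⟨h1, h2⟩
      · exact Or.inl h'
      · exact Or.inr ⟨le_trans h1 (le_max_left _ _), le_trans h2 (le_max_left _ _)⟩
    · rw [max_eq_left h1, max_eq_left h2]
      apply ih
      intro r hr
      exact h r (by simp [hr])

-- A's threaded (cur, min_level) fold equals a prefix-max fold
lemma fold_eq (l : List (Int × Int)) (ml pre : Int) :
    (l.foldl (fun (st : Int × Int) p =>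
      if p.1 ≥ st.2 then (st.1 + ((p.1 - st.2) + 1), (st.2 + ((p.1 - st.2) + 1)) + p.2)
      else (st.1, st.2 + p.2)) (ml, ml + pre)).1
    = (l.foldl (fun (st : Int × Int) p => (max st.1 (p.1 - st.2 + 1), st.2 + p.2)) (ml, pre)).1 := by
  induction l generalizing ml pre with
  | nil => rfl
  | cons p t ih =>
    simp only [List.foldl_cons]
    by_cases h : p.1 ≥ ml + pre
    · have h1 : max ml (p.1 - pre + 1) = p.1 - pre + 1 := by omega
      rw [if_pos h, h1]
      rw [← ih (p.1 - pre + 1) (pre + p.2)]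
      have e1 : ml + (p.1 - (ml + pre) + 1) = p.1 - pre + 1 := by ring
      have e2 : ml + pre + (p.1 - (ml + pre) + 1) + p.2 = p.1 - pre + 1 + (pre + p.2) := by ring
      rw [e1, e2]
    · have h1 : max ml (p.1 - pre + 1) = ml := by omega
      rw [if_neg h, h1]
      rw [← ih ml (pre + p.2)]
      have e3 : ml + pre + p.2 = ml + (pre + p.2) := by ring
      rw [e3]

-- on a key-sorted list with nonnegative sizes, the prefix-max fold equals the max of
-- diff - (size of the strictly-smaller elements) + 1
lemma prefix_eq_sb (l : List (Int × Int)) :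
    ∀ (b pre : Int), l.Pairwise (fun a c => a.1 ≤ c.1) → (∀ q ∈ l, 0 ≤ q.2) →
    (l.foldl (fun (st : Int × Int) p => (max st.1 (p.1 - st.2 + 1), st.2 + p.2)) (b, pre)).1
    = l.foldl (fun acc p => max acc (p.1 - (pre + SB l p.1) + 1)) b := by
  induction l with
  | nil => intros; rfl
  | cons p t ih =>
    intro b pre hsort hsz
    have hp : ∀ q ∈ t, p.1 ≤ q.1 := fun q hq => (List.pairwise_cons.1 hsort).1 q hq
    have hsz' : ∀ q ∈ t, 0 ≤ q.2 := fun q hq => hsz q (by simp [hq])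
    simp only [List.foldl_cons]
    rw [ih (max b (p.1 - pre + 1)) (pre + p.2) (List.pairwise_cons.1 hsort).2 hsz']
    have hsb0 : SB (p :: t) p.1 = 0 := by
      unfold SB
      have : (p :: t).filter (fun q => decide (q.1 < p.1)) = [] := by
        rw [List.filter_eq_nil_iff]
        intro q hq
        rcases List.mem_cons.1 hq with rfl | hq'
        · simp
        · simp only [decide_eq_true_eq]; exact not_lt.2 (hp q hq')
      rw [this]; rfl
    rw [hsb0]
    have hstart : p.1 - (pre + 0) + 1 = p.1 - pre + 1 := by ring
    rw [hstart]
    apply maxfold_congr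
    intro q hq
    rw [SB_cons]
    rcases lt_or_eq_of_le (hp q hq) with hlt | heq
    · left; rw [if_pos hlt]; ring
    · right
      rw [if_neg (by omega)]
      have hnn : 0 ≤ SB t q.1 := SB_nonneg t q.1 hsz'
      have hq2 : 0 ≤ q.2 := hsz' q hq
      have hp2 : 0 ≤ p.2 := hsz p (by simp)
      constructor
      · have : p.1 - pre + 1 ≤ max b (p.1 - pre + 1) := le_max_right _ _
        omega
      · have : p.1 - pre + 1 ≤ max b (p.1 - pre + 1) := le_max_right _ _
        omega

-- the two mutation comprehensions build the same list
lemma mutate_eq (cave : List Int) :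
    (PySem.List.enumerate cave 0).map (fun p => p.2 - p.1)
      = (PySem.List.pyRange 0 cave.length 1).map (fun i => PySem.List.pyGetD cave i 0 - i) := by
  rw [PySem.List.enumerate_eq_map_pyRange (d := 0)]
  simp [List.map_map, Function.comp]

-- ===== VERDICT (by name: the statement is the Claim_ definition above) =====
theorem solve_spec : Claim_equal_solve := by
  intro caves _ _
  unfold Spec_solve solve solve_alt
  simp only [mutate_eq]
  set caves' := caves.map (fun cave =>
    (PySem.List.pyRange 0 cave.length 1).map (fun i => PySem.List.pyGetD cave i 0 - i)) with hc
  set stats := caves'.map (fun a => ((PySem.List.max? a (fun x => x)).getD 0, (a.length : Int))) with hs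
  have hperm : (PySem.List.sorted stats (fun x => x.1) false).Perm stats :=
    PySem.List.sorted_perm stats (fun x => x.1) false
  have hsz : ∀ q ∈ stats, 0 ≤ q.2 := by
    intro q hq
    obtain ⟨a, _, rfl⟩ := List.mem_map.1 hq
    exact Int.natCast_nonneg _
  have hszs : ∀ q ∈ PySem.List.sorted stats (fun x => x.1) false, 0 ≤ q.2 :=
    fun q hq => hsz q (hperm.mem_iff.1 hq)
  have hsort : (PySem.List.sorted stats (fun x => x.1) false).Pairwise (fun a c => a.1 ≤ c.1) :=
    PySem.List.sorted_pairwise stats (fun x => x.1)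
  rw [show ((0 : Int), (0 : Int)) = ((0 : Int), (0 : Int) + (0 : Int)) by norm_num]
  rw [fold_eq]
  rw [prefix_eq_sb _ 0 0 hsort hszs]
  have hSB : ∀ x, SB (PySem.List.sorted stats (fun x => x.1) false) x = SB stats x :=
    fun x => SB_perm hperm x
  simp only [hSB, zero_add]
  rw [foldl_max_perm hperm (fun p => p.1 - SB stats p.1 + 1) 0]
  rfl
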